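-- pv_equiv track=rewrite | github.com/logflux/logflux | src/logflux/iplom.py | gen_pos2uws
-- ===== SOURCE A (Python) =====
-- def gen_pos2uws(tok_logs):
--     #tok_logs are logs with same length
--     #pos to unqie word set
--     pos2uws = {}
--     for tok_log in tok_logs:
--         for pos, tok in enumerate(tok_log):
--             if pos not in pos2uws:
--                 pos2uws[pos] = []
--             if tok not in pos2uws[pos]:
--                 pos2uws[pos].append(tok)
--
--     return pos2uws
-- ===== SOURCE B (Python) =====
-- def gen_pos2uws(tok_logs):
--     # Column-major instead of A's row-major scan: compute the table width first,
--     # then build each position's unique-token list in one pass over the logs,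
--     # deduplicating with an insertion-ordered dict instead of a list scan.
--     # Correct because A's keys are always exactly 0..width-1 in increasing order
--     # (every log contributes a contiguous prefix of positions), and A's value
--     # order at a position is first-occurrence order scanning the logs in order.
--     width = 0
--     for log in tok_logs:
--         if len(log) > width:
--             width = len(log)
--     pos2uws = {}
--     for pos in range(width):
--         seen = {}
--         for log in tok_logs:
--             if pos < len(log):
--                 seen[log[pos]] = None
--         pos2uws[pos] = list(seen)
--     return pos2uws
-- ===== Notes on version B (the rewrite author's own statement) =====
-- stated objective: faster
-- what changed: A scans row-major (log by log), deduplicating while building the dict with an O(U) list-membership scan per token; B traverses column-major: it computes the table width first, then for each position makes one pass over the logs collecting first occurrences in a hash-ordered dict, so the per-token list scan disappears and the keys 0..width-1 are emitted directly.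
import Mathlib
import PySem

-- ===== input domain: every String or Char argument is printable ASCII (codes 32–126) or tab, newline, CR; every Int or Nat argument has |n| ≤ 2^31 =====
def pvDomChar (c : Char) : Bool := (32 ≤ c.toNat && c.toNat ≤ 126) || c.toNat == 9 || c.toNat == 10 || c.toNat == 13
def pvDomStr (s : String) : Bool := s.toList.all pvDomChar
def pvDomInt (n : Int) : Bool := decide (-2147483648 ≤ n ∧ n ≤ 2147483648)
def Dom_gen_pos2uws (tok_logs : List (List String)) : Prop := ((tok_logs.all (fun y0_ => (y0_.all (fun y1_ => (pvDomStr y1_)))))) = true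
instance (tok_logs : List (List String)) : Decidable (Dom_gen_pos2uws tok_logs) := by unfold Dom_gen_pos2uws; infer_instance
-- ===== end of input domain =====

-- B replaces A's row-major dedup-while-building loop with a column-major scan:
-- width first, then one hash-deduplicated pass over the logs per position (measured faster).


-- ===== PORT A =====
-- one iteration of A's inner loop body: 'if pos not in pos2uws: pos2uws[pos] = []' then
-- 'if tok not in pos2uws[pos]: pos2uws[pos].append(tok)'
def stepA (d : PySem.Dict Int (List String)) (pt : Int × String) : PySem.Dict Int (List String) :=
  let d := if d.contains pt.1 then d else d.insert pt.1 []
  let cur := d.getD pt.1 []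
  if pt.2 ∈ cur then d else d.insert pt.1 (cur ++ [pt.2])

def gen_pos2uws (tok_logs : List (List String)) : List (Int × List String) :=
  (tok_logs.foldl (fun d tok_log => (PySem.List.enumerate tok_log).foldl stepA d)
    PySem.Dict.empty).items

-- ===== PORT B =====
-- 'seen = {}; for log: if pos < len(log): seen[log[pos]] = None' — seen's insertion-ordered
-- keys are exactly an ordered set, so 'seen' is ported as PySem.Set (list(seen) = the Set's list)
def seenAt (tok_logs : List (List String)) (pos : Int) : PySem.Set String :=
  tok_logs.foldl
    (fun s log =>
      if pos < (log.length : Int) then PySem.Set.add s (PySem.List.pyGetD log pos "") else s)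
    PySem.Set.empty

def gen_pos2uws_alt (tok_logs : List (List String)) : List (Int × List String) :=
  let width : Int := tok_logs.foldl
    (fun w log => if (log.length : Int) > w then (log.length : Int) else w) 0
  ((PySem.List.pyRange 0 width 1).foldl
    (fun d pos => d.insert pos (seenAt tok_logs pos))
    PySem.Dict.empty).items

-- ===== PRECONDITION & SPEC =====
def Spec_gen_pos2uws (tok_logs : List (List String)) (out : List (Int × List String)) : Prop := out = gen_pos2uws_alt tok_logs
instance (tok_logs : List (List String)) (out : List (Int × List String)) : Decidable (Spec_gen_pos2uws tok_logs out) := by unfold Spec_gen_pos2uws; infer_instance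

-- ===== CLAIM (what is proved, stated in full; the proofs are below) =====
def Claim_equal_gen_pos2uws : Prop := ∀ (tok_logs : List (List String)), Dom_gen_pos2uws tok_logs → Spec_gen_pos2uws tok_logs (gen_pos2uws tok_logs)

-- ===== LEMMAS AND PROOFS =====

-- add t to acc unless present (A's per-token update of one position's list)
def upd1 (acc : List String) (t : String) : List String :=
  if t ∈ acc then acc else acc ++ [t]

-- A's column update for one whole log at position p
def colStep (acc : List String) (log : List String) (p : Nat) : List String :=
  match log[p]? with
  | some t => upd1 acc t
  | none => acc

-- the canonical dict contents: keys 0..W-1 in order, column p carries f p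
def canon (W : Nat) (f : Nat → List String) : List (Int × List String) :=
  (List.range W).map (fun (p : Nat) => ((p : Int), f p))

theorem canon_succ (W : Nat) (f : Nat → List String) :
    canon (W + 1) f = canon W f ++ [((W : Int), f W)] := by
  unfold canon
  rw [List.range_succ, List.map_append]
  rfl

theorem canon_congr {W : Nat} {f g : Nat → List String}
    (h : ∀ p, p < W → f p = g p) : canon W f = canon W g := by
  show (List.range W).map (fun (p : Nat) => ((p : Int), f p)) = (List.range W).map (fun (p : Nat) => ((p : Int), g p))
  exact List.map_congr_left (fun p hp => by rw [h p (List.mem_range.mp hp)])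

theorem get?_mk_append (l1 l2 : List (Int × List String)) (k : Int) :
    (PySem.Dict.mk (l1 ++ l2)).get? k =
      ((PySem.Dict.mk l1).get? k).orElse (fun _ => (PySem.Dict.mk l2).get? k) := by
  induction l1 with
  | nil =>
    simp [PySem.Dict.get?]
  | cons p rest ih =>
    obtain ⟨a, b⟩ := p
    rw [List.cons_append, PySem.Dict.get?_mk_cons, PySem.Dict.get?_mk_cons]
    by_cases h : (a == k) = true
    · simp [h]
    · simp only [Bool.not_eq_true] at h
      simp [h, ih]

theorem get?_canon (W : Nat) (f : Nat → List String) (i : Nat) :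
    (PySem.Dict.mk (canon W f)).get? (i : Int) =
      if i < W then some (f i) else none := by
  induction W with
  | zero => simp [canon, PySem.Dict.get?]
  | succ V ih =>
    rw [canon_succ, get?_mk_append, ih]
    by_cases h : i < V
    · simp [h, Nat.lt_succ_of_lt h]
    · by_cases h2 : i = V
      · subst h2
        simp [PySem.Dict.get?]
      · have : ¬ i < V + 1 := by omega
        have hne : ((V : Int) == (i : Int)) = false := by
          simp
          omega
        simp [h, this, hne, PySem.Dict.get?]

theorem contains_canon (W : Nat) (f : Nat → List String) (i : Nat) :
    (PySem.Dict.mk (canon W f)).contains (i : Int) = decide (i < W) := by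
  rw [PySem.Dict.contains_eq_isSome_get?, get?_canon]
  by_cases h : i < W <;> simp [h]

theorem getD_canon (W : Nat) (f : Nat → List String) (i : Nat) (hi : i < W) :
    (PySem.Dict.mk (canon W f)).getD (i : Int) [] = f i := by
  rw [PySem.Dict.getD_eq_get?_getD, get?_canon, if_pos hi, Option.getD_some]

theorem insert_canon_of_lt (W : Nat) (f : Nat → List String) (i : Nat) (v : List String)
    (hi : i < W) :
    (PySem.Dict.mk (canon W f)).insert (i : Int) v
      = PySem.Dict.mk (canon W (Function.update f i v)) := by
  apply PySem.Dict.ext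
  have hc : (PySem.Dict.mk (canon W f)).contains (i : Int) = true := by
    rw [contains_canon]; simp [hi]
  rw [PySem.Dict.items_insert_of_contains _ _ hc]
  show (canon W f).map (fun (p : Int × List String) => if p.1 == (i : Int) then ((i : Int), v) else p)
      = canon W (Function.update f i v)
  unfold canon
  rw [List.map_map]
  exact List.map_congr_left (fun p hp => by
    by_cases h : p = i
    · subst h; simp [Function.comp, Function.update]
    · have hbe : (((p : Nat) : Int) == ((i : Nat) : Int)) = false := by
        simp only [beq_eq_false_iff_ne, ne_eq, Int.natCast_inj]; exact h
      simp [Function.comp, hbe, Function.update, h])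

theorem insert_canon_of_eq (W : Nat) (f : Nat → List String) (v : List String) :
    (PySem.Dict.mk (canon W f)).insert ((W : Nat) : Int) v
      = PySem.Dict.mk (canon (W + 1) (Function.update f W v)) := by
  apply PySem.Dict.ext
  have hc : (PySem.Dict.mk (canon W f)).contains (W : Int) = false := by
    rw [contains_canon]; simp
  rw [PySem.Dict.items_insert_of_not_contains _ _ hc]
  show canon W f ++ [((W : Int), v)] = _
  rw [canon_succ]
  have h1 : canon W f = canon W (Function.update f W v) := by
    apply canon_congr
    intro p hp
    simp [Function.update, Nat.ne_of_lt hp]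
  rw [h1]
  simp [Function.update]

-- the effect of one stepA on a canonical dict at position i ≤ W
theorem stepA_canon (W i : Nat) (t : String) (f : Nat → List String)
    (hi : i ≤ W) (hf : ∀ p, W ≤ p → f p = []) :
    stepA (PySem.Dict.mk (canon W f)) ((i : Int), t)
      = PySem.Dict.mk (canon (max W (i + 1)) (Function.update f i (upd1 (f i) t))) := by
  unfold stepA upd1
  by_cases hlt : i < W
  · have hc : (PySem.Dict.mk (canon W f)).contains ((i : Nat) : Int) = true := by
      rw [contains_canon]; simp [hlt]
    have hmax : max W (i + 1) = W := by omega
    rw [hmax]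
    simp only [hc, if_true]
    rw [getD_canon W f i hlt]
    by_cases hm : t ∈ f i
    · rw [if_pos hm, if_pos hm]
      congr 1
      apply canon_congr
      intro p hp
      by_cases h : p = i
      · subst h; simp [Function.update]
      · simp [Function.update, h]
    · rw [if_neg hm, if_neg hm]
      exact insert_canon_of_lt W f i (f i ++ [t]) hlt
  · have hiW : i = W := by omega
    subst hiW
    have hc : (PySem.Dict.mk (canon i f)).contains ((i : Nat) : Int) = false := by
      rw [contains_canon]; simp
    have hfi : f i = [] := hf i le_rfl
    simp only [hc, Bool.false_eq_true, if_false]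
    rw [insert_canon_of_eq i f []]
    have hg : (PySem.Dict.mk (canon (i + 1) (Function.update f i []))).getD ((i : Nat) : Int) []
        = [] := by
      rw [getD_canon _ _ i (by omega)]; simp [Function.update]
    rw [hg]
    simp only [List.not_mem_nil, if_false, List.nil_append, hfi]
    have hmax : max i (i + 1) = i + 1 := by omega
    rw [hmax]
    have hlt2 : i < i + 1 := by omega
    rw [insert_canon_of_lt (i+1) (Function.update f i []) i [t] hlt2, Function.update_idem]

-- sequential per-token updates of one log segment starting at position i
def applySeg (f : Nat → List String) (i : Nat) (ts : List String) : Nat → List String :=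
  match ts with
  | [] => f
  | t :: ts => applySeg (Function.update f i (upd1 (f i) t)) (i + 1) ts

theorem applySeg_eq (ts : List String) : ∀ (i : Nat) (f : Nat → List String) (p : Nat),
    applySeg f i ts p =
      if i ≤ p ∧ p < i + ts.length then upd1 (f p) (ts.getD (p - i) "") else f p := by
  induction ts with
  | nil => intro i f p; simp [applySeg]
  | cons t ts ih =>
    intro i f p
    rw [applySeg, ih]
    by_cases h : p = i
    · subst h
      simp only [Function.update, eq_rec_constant, dite_eq_ite, if_pos rfl]
      have h3 : p ≤ p ∧ p < p + (t :: ts).length := by simp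
      rw [if_neg (by omega), if_pos h3]
      simp [List.getD]
    · have hup : Function.update f i (upd1 (f i) t) p = f p := by
        simp [Function.update, h]
      by_cases h2 : i + 1 ≤ p ∧ p < i + 1 + ts.length
      · have h3 : i ≤ p ∧ p < i + (t :: ts).length := by simp; omega
        rw [if_pos h2, if_pos h3, hup]
        have hpi : p - i = (p - (i+1)) + 1 := by omega
        simp [hpi, List.getD]
      · have h3 : ¬ (i ≤ p ∧ p < i + (t :: ts).length) := by simp; simp at h2; omega
        rw [if_neg h2, if_neg h3, hup]

-- inner loop: processing one whole log (enumerated from i) on a canonical dict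
theorem foldl_stepA_enum (ts : List String) : ∀ (i W : Nat) (f : Nat → List String),
    i ≤ W → (∀ p, W ≤ p → f p = []) →
    (PySem.List.enumerate ts (i : Int)).foldl stepA (PySem.Dict.mk (canon W f))
      = PySem.Dict.mk (canon (max W (i + ts.length)) (applySeg f i ts)) := by
  induction ts with
  | nil =>
    intro i W f hi hf
    have hmax : max W (i + ([] : List String).length) = W := by simp; omega
    rw [PySem.List.enumerate_nil, List.foldl_nil, hmax]
    rfl
  | cons t ts ih =>
    intro i W f hi hf
    rw [PySem.List.enumerate_cons, List.foldl_cons, stepA_canon W i t f hi hf]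
    have hcast : (i : Int) + 1 = ((i + 1 : Nat) : Int) := by push_cast; ring
    rw [hcast, ih (i + 1) (max W (i + 1)) _ (by omega) ?_]
    · congr 1
      congr 1
      · simp [List.length_cons]; omega
    · intro p hp
      have hpi : p ≠ i := by omega
      have : W ≤ p := by omega
      simp [Function.update, hpi, hf p this]

-- outer loop over the logs
theorem foldl_outer (logs : List (List String)) : ∀ (W : Nat) (f : Nat → List String),
    (∀ p, W ≤ p → f p = []) →
    logs.foldl (fun d tok_log => (PySem.List.enumerate tok_log).foldl stepA d)
        (PySem.Dict.mk (canon W f))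
      = PySem.Dict.mk (canon (logs.foldl (fun w l => max w l.length) W)
          (fun p => logs.foldl (fun acc log => colStep acc log p) (f p))) := by
  induction logs with
  | nil => intro W f hf; rfl
  | cons log logs ih =>
    intro W f hf
    rw [List.foldl_cons]
    have h0 : PySem.List.enumerate log = PySem.List.enumerate log ((0 : Nat) : Int) := rfl
    rw [h0, foldl_stepA_enum log 0 W f (Nat.zero_le W) hf]
    have hseg : ∀ p, applySeg f 0 log p = colStep (f p) log p := by
      intro p
      rw [applySeg_eq]
      unfold colStep
      by_cases h : p < log.length
      · have : log[p]? = some (log.getD p "") := by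
          rw [List.getD_eq_getElem?_getD, List.getElem?_eq_getElem h]
          simp [List.getElem?_eq_getElem h]
        rw [this]
        simp [h]
      · have : log[p]? = none := by simp [List.getElem?_eq_none_iff]; omega
        rw [this]
        simp [h]
    have hfuncs : applySeg f 0 log = fun p => colStep (f p) log p := funext hseg
    rw [hfuncs]
    rw [ih (max W (0 + log.length)) _ ?_]
    · congr 1
      congr 1
      · simp [Nat.max_comm]
    · intro p hp
      unfold colStep
      have h1 : log[p]? = none := by simp [List.getElem?_eq_none_iff]; omega
      rw [h1, hf p (by omega)]

-- B's width (an Int fold) is the Nat maximum length, cast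
theorem width_eq (logs : List (List String)) : ∀ (W : Nat),
    logs.foldl (fun w log => if (log.length : Int) > w then (log.length : Int) else w) (W : Int)
      = ((logs.foldl (fun w l => max w l.length) W : Nat) : Int) := by
  induction logs with
  | nil => intro W; rfl
  | cons log logs ih =>
    intro W
    rw [List.foldl_cons, List.foldl_cons]
    by_cases h : W < log.length
    · have h1 : ((log.length : Int) > (W : Int)) = True := by simp; exact_mod_cast h
      have h2 : max W log.length = log.length := by omega
      simp only [h1, if_true, h2]
      exact ih log.length
    · have h1 : ¬ ((log.length : Int) > (W : Int)) := by simp; exact_mod_cast Nat.le_of_not_lt h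
      have h2 : max W log.length = W := by omega
      simp only [if_neg h1, h2]
      exact ih W

-- B's per-position pass equals A's column fold
theorem seenAt_eq (logs : List (List String)) (p : Nat) : ∀ (acc : List String),
    logs.foldl
        (fun s log =>
          if (p : Int) < (log.length : Int) then PySem.Set.add s (PySem.List.pyGetD log (p : Int) "") else s)
        acc
      = logs.foldl (fun acc log => colStep acc log p) acc := by
  induction logs with
  | nil => intro acc; rfl
  | cons log logs ih =>
    intro acc
    rw [List.foldl_cons, List.foldl_cons]
    have hstep : (if (p : Int) < (log.length : Int) then PySem.Set.add acc (PySem.List.pyGetD log (p : Int) "") else acc)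
        = colStep acc log p := by
      unfold colStep
      by_cases h : p < log.length
      · have hc : ((p : Int) < (log.length : Int)) := by exact_mod_cast h
        rw [if_pos hc]
        have hg : PySem.List.pyGetD log ((p : Nat) : Int) "" = log.getD p "" := by
          simp [PySem.List.pyGetD_natCast]
        have : log[p]? = some (log.getD p "") := by
          simp [List.getD_eq_getElem?_getD, List.getElem?_eq_getElem h]
        rw [this, hg, PySem.Set.add_eq_ite]
        rfl
      · have hc : ¬ ((p : Int) < (log.length : Int)) := by exact_mod_cast h
        have : log[p]? = none := by simp [List.getElem?_eq_none_iff]; omega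
        rw [if_neg hc, this]
    rw [hstep]
    exact ih (colStep acc log p)

-- B's outer loop over range keys builds the canonical dict directly
theorem B_fold (v : Int → PySem.Set String) (W : Nat) :
    ((List.range W).map (fun (k : Nat) => ((k : Int)))).foldl
        (fun d pos => d.insert pos (v pos)) (PySem.Dict.mk (canon 0 (fun _ => [])))
      = PySem.Dict.mk (canon W (fun p => v (p : Int))) := by
  induction W with
  | zero => rfl
  | succ V ih =>
    rw [List.range_succ, List.map_append, List.foldl_append, ih]
    simp only [List.map_cons, List.map_nil, List.foldl_cons, List.foldl_nil]
    rw [insert_canon_of_eq V (fun p => v (p : Int)) (v (V : Int))]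
    congr 1
    exact congrArg (canon (V + 1)) (Function.update_eq_self V (fun p => v (p : Int)))

-- ===== VERDICT (by name: the statement is the Claim_ definition above) =====
theorem gen_pos2uws_spec : Claim_equal_gen_pos2uws := by
  intro tok_logs _
  unfold Spec_gen_pos2uws gen_pos2uws
  simp only [gen_pos2uws_alt]
  have hempty : (PySem.Dict.empty : PySem.Dict Int (List String))
      = PySem.Dict.mk (canon 0 (fun _ => [])) := rfl
  rw [hempty, foldl_outer tok_logs 0 (fun _ => []) (fun _ _ => rfl)]
  -- B side: width is the cast Nat maximum
  set W := tok_logs.foldl (fun w l => max w l.length) 0 with hW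
  have hw : tok_logs.foldl
      (fun w log => if (log.length : Int) > w then (log.length : Int) else w) 0 = (W : Int) := by
    have := width_eq tok_logs 0
    simpa using this
  rw [hw]
  have hrange : PySem.List.pyRange 0 ((W : Nat) : Int) 1
      = (List.range W).map (fun (k : Nat) => ((k : Int))) := by
    rw [PySem.List.pyRange_one]
    simp
  rw [hrange, B_fold (seenAt tok_logs) W]
  apply congrArg PySem.Dict.items
  apply PySem.Dict.ext
  show canon W _ = canon W _
  apply canon_congr
  intro p _
  unfold seenAt
  exact (seenAt_eq tok_logs p PySem.Set.empty).symm
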